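-- pv_equiv track=rewrite | github.com/conord-bynder/Advent_Of_Code_2019 | advent_4.py | check_password_min_reqs
-- ===== SOURCE A (Python) =====
-- def check_password_min_reqs(password):
--     digit_list = [int(d) for d in str(password)]
--     dupe_found = False
--
--     for index, digit in enumerate(digit_list):
--         if index == len(digit_list) - 1 :
--             break
--         if digit_list[index+1] == digit:
--             dupe_found = True
--             break
--
--     if not dupe_found:
--         return
--
--     sorted_list = digit_list.copy()
--     sorted_list.sort()
--
--     if digit_list == sorted_list:
--         return password
-- ===== SOURCE B (Python) =====
-- def check_password_min_reqs(password):
--     digits = [int(d) for d in str(password)]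
--     has_dup = False
--     non_decreasing = True
--     for a, b in zip(digits, digits[1:]):
--         if a == b:
--             has_dup = True
--         if a > b:
--             non_decreasing = False
--     if has_dup and non_decreasing:
--         return password
-- ===== Notes on version B (the rewrite author's own statement) =====
-- stated objective: simpler
-- what changed: A's two separate tests (an index-based early-exit dup loop, then a sort-and-compare ordering check) are replaced by one linear pass over adjacent pairs maintaining two booleans (has_dup, non_decreasing).
import Mathlib
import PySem

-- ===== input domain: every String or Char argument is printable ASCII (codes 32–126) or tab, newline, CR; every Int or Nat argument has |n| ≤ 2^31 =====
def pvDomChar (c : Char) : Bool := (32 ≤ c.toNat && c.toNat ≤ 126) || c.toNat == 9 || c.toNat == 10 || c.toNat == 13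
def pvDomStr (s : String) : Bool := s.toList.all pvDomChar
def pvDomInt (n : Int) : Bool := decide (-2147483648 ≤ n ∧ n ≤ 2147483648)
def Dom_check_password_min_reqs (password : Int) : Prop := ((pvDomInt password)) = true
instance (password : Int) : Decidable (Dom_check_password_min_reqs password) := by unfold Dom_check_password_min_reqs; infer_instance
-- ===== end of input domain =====

-- B replaces A's separate dup loop plus sort-and-compare by a single pass over adjacent digit pairs (simpler).

-- ===== PORT A =====
-- the dup-search loop: 'for index, digit in enumerate(digit_list): if index == len-1: break; if digit_list[index+1] == digit: dupe_found = True; break'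
-- digit_list[index+1] is always in range when taken; .getD 0 only discharges the Option
def pvADupGo (l : List Int) : List (Int × Int) → Bool
  | [] => false
  | (i, d) :: rest =>
    if i = (l.length : Int) - 1 then false
    else if (PySem.List.pyGet? l (i + 1)).getD 0 = d then true
    else pvADupGo l rest

def check_password_min_reqs (password : Int) : Option Int :=
  -- [int(d) for d in str(password)]; under Pre_ every char is a digit so ofChars? is some (.getD 0 unreachable)
  let digit_list := (PySem.Int.toChars password).map (fun c => (PySem.Int.ofChars? [c]).getD 0)
  let dupe_found := pvADupGo digit_list (PySem.List.enumerate digit_list 0)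
  if dupe_found = false then none
  else
    let sorted_list := PySem.List.sorted digit_list (fun x => x) false
    if digit_list = sorted_list then some password else none

-- ===== PORT B =====
-- 'for a, b in zip(digits, digits[1:])' maintaining (has_dup, non_decreasing)
def pvScanPairs : List (Int × Int) → Bool → Bool → Bool × Bool
  | [], hd, nd => (hd, nd)
  | (a, b) :: rest, hd, nd => pvScanPairs rest (hd || decide (a = b)) (nd && decide (a ≤ b))

def check_password_min_reqs_alt (password : Int) : Option Int :=
  let digits := (PySem.Int.toChars password).map (fun c => (PySem.Int.ofChars? [c]).getD 0)
  let p := pvScanPairs (digits.zip (PySem.List.slice digits (some 1) none)) false true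
  if p.1 && p.2 then some password else none

-- ===== PRECONDITION & SPEC =====
-- Pre_ excludes negative passwords: there str(password) starts with '-' and int('-') raises ValueError in both A and B.
def Pre_check_password_min_reqs (password : Int) : Prop := 0 ≤ password
instance (password : Int) : Decidable (Pre_check_password_min_reqs password) := by unfold Pre_check_password_min_reqs; infer_instance
def pvWitness_check_password_min_reqs : Int := 113450

def Spec_check_password_min_reqs (password : Int) (out : Option Int) : Prop := out = check_password_min_reqs_alt password
instance (password : Int) (out : Option Int) : Decidable (Spec_check_password_min_reqs password out) := by unfold Spec_check_password_min_reqs; infer_instance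

-- ===== CLAIM (what is proved, stated in full; the proofs are below) =====
def Claim_equal_check_password_min_reqs : Prop := ∀ (password : Int), Dom_check_password_min_reqs password → Pre_check_password_min_reqs password → Spec_check_password_min_reqs password (check_password_min_reqs password)

-- ===== LEMMAS AND PROOFS =====

-- clean adjacent-pair predicates the two loops are reduced to
def pvAdj : List Int → Bool
  | a :: b :: t => decide (a = b) || pvAdj (b :: t)
  | _ => false

def pvMono : List Int → Bool
  | a :: b :: t => decide (a ≤ b) && pvMono (b :: t)
  | _ => true

theorem pvScanPairs_spec (l : List Int) (hd nd : Bool) :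
    pvScanPairs (l.zip (l.drop 1)) hd nd = (hd || pvAdj l, nd && pvMono l) := by
  induction l generalizing hd nd with
  | nil => simp [pvScanPairs, pvAdj, pvMono]
  | cons a t ih =>
    cases t with
    | nil => simp [pvScanPairs, pvAdj, pvMono]
    | cons b t' =>
      simp only [List.drop_succ_cons, List.drop_zero, List.zip_cons_cons, pvScanPairs]
      rw [show b :: t' = (b :: t') from rfl] at ih
      have := ih (hd := hd || decide (a = b)) (nd := nd && decide (a ≤ b))
      simp only [List.drop_succ_cons, List.drop_zero] at this
      rw [this]
      simp [pvAdj, pvMono, Bool.or_assoc, Bool.and_assoc]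

theorem pvADupGo_drop (l : List Int) (t : List Int) :
    ∀ k : Nat, l.drop k = t → pvADupGo l (PySem.List.enumerate t (k : Int)) = pvAdj t := by
  induction t with
  | nil => intro k _; simp [PySem.List.enumerate_nil, pvADupGo, pvAdj]
  | cons d t' ih =>
    intro k hk
    have hlen : l.length = k + 1 + t'.length := by
      have := congrArg List.length hk
      simp at this
      omega
    rw [PySem.List.enumerate_cons]
    cases t' with
    | nil =>
      simp only [pvADupGo]
      have : (k : Int) = (l.length : Int) - 1 := by
        rw [hlen, List.length_nil]; push_cast; omega
      rw [if_pos this]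
      rfl
    | cons e t'' =>
      simp only [pvADupGo]
      have hne : ¬ ((k : Int) = (l.length : Int) - 1) := by
        rw [hlen, List.length_cons]; push_cast; omega
      rw [if_neg hne]
      have hget : PySem.List.pyGet? l ((k : Int) + 1) = some e := by
        have h1 : PySem.List.pyGet? l (((k + 1 : Nat) : Int)) = l[k+1]? :=
          PySem.List.pyGet?_natCast l (k + 1)
        have hidx : l[k+1]? = some e := by
          have h2 : (l.drop k)[1]? = some e := by rw [hk]; rfl
          rwa [List.getElem?_drop] at h2
        push_cast at h1
        rw [h1, hidx]
      rw [hget]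
      simp only [Option.getD_some]
      by_cases hde : e = d
      · rw [if_pos hde]
        simp [pvAdj, hde]
      · rw [if_neg hde]
        have hdrop : l.drop (k + 1) = e :: t'' := by
          have h3 : (l.drop k).drop 1 = e :: t'' := by rw [hk]; rfl
          rwa [List.drop_drop] at h3
        have h4 := ih (k + 1) hdrop
        push_cast at h4
        rw [h4]
        simp only [pvAdj]
        have h5 : decide (d = e) = false := by simp; exact fun h => hde h.symm
        simp [h5]

theorem pvMono_iff_pairwise (l : List Int) : pvMono l = true ↔ l.Pairwise (· ≤ ·) := by
  rw [← List.isChain_iff_pairwise]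
  induction l with
  | nil => simp [pvMono]
  | cons a t ih =>
    cases t with
    | nil => simp [pvMono]
    | cons b t' =>
      simp only [pvMono, Bool.and_eq_true, decide_eq_true_eq, List.isChain_cons_cons]
      exact and_congr Iff.rfl ih

theorem pvSorted_eq_iff_mono (l : List Int) :
    (l = PySem.List.sorted l (fun x => x) false) ↔ pvMono l = true := by
  constructor
  · intro h
    rw [pvMono_iff_pairwise]
    have hp := PySem.List.sorted_pairwise (xs := l) (key := fun x => x)
    rw [← h] at hp
    exact hp
  · intro h
    rw [pvMono_iff_pairwise] at h
    exact (PySem.List.sorted_eq_self_of_pairwise l (fun x => x) h).symm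

-- ===== VERDICT (by name: the statement is the Claim_ definition above) =====
theorem check_password_min_reqs_spec : Claim_equal_check_password_min_reqs := by
  intro password _ _
  unfold Spec_check_password_min_reqs check_password_min_reqs check_password_min_reqs_alt
  set ds := (PySem.Int.toChars password).map (fun c => (PySem.Int.ofChars? [c]).getD 0) with hds
  have hdup := pvADupGo_drop ds ds 0 (by simp)
  push_cast at hdup
  have hscan := pvScanPairs_spec ds false true
  simp only [PySem.List.slice_from_one, ← List.drop_one, hscan, hdup,
    Bool.false_or, Bool.true_and]
  cases hA : pvAdj ds with
  | false => simp
  | true =>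
    simp only [Bool.true_and, if_neg (by simp : ¬ (true = false))]
    by_cases hm : pvMono ds = true
    · rw [if_pos ((pvSorted_eq_iff_mono ds).mpr hm), hm, if_pos rfl]
    · have hmf : pvMono ds = false := by revert hm; cases pvMono ds <;> simp
      rw [if_neg (fun h => hm ((pvSorted_eq_iff_mono ds).mp h)), hmf]
      simp
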